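-- pv_equiv track=rewrite | github.com/AllanKoder/Competitive-Programming-Training | algorithms/test.py | label_graph_minimize_outdegree
-- ===== SOURCE A (Python) =====
-- def label_graph_minimize_outdegree(G):
--     """
--     Label the vertices of the graph such that the largest out-degree is minimized.
--     Args:
--     - G: a dictionary representing the graph where the key is the node,
--          and the value is a list of neighbors (adjacency list representation).
--
--     Returns:
--     - labelling: a dictionary where the keys are nodes and the values are their labels.
--     """
--     # Step 1: Sort vertices by their degree (number of edges)
--     sorted_nodes = sorted(G.keys(), key=lambda node: len(G[node]))
--
--     # Step 2: Assign labels starting from 1 to n (number of vertices)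
--     labelling = {}
--     label = 1
--     for node in sorted_nodes:
--         labelling[node] = label
--         label += 1
--
--     return labelling
-- ===== SOURCE B (Python) =====
-- def label_graph_minimize_outdegree(G):
--     # Counting-style relabelling: bucket nodes by out-degree (ascending, stable)
--     # instead of calling a comparison sort, then label in emission order.
--     degs = [(node, len(adj)) for node, adj in G.items()]
--     max_d = max((d for _, d in degs), default=-1)
--     order = [node for d in range(max_d + 1) for node, dd in degs if dd == d]
--     return {node: label for label, node in enumerate(order, 1)}
-- ===== Notes on version B (the rewrite author's own statement) =====
-- stated objective: alternative
-- what changed: Replaces the comparison sort over keys with a counting-style bucket emission: degrees are computed once, and nodes are emitted per degree value 0..max_degree in input order (stable), so no sorted() call is made.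
import Mathlib
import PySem

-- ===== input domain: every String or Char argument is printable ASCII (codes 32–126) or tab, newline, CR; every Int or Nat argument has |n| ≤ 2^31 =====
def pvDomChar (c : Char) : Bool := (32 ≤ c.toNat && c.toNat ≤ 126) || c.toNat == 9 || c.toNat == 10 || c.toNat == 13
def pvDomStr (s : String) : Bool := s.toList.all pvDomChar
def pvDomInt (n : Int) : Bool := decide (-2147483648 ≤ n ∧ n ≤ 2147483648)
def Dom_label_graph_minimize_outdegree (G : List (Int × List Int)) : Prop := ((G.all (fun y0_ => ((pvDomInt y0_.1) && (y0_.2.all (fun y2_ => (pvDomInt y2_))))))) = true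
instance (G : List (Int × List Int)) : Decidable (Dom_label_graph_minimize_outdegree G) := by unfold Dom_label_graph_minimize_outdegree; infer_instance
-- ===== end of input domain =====

-- B replaces the comparison sort over the keys by a stable counting-style bucket
-- emission per degree value 0..max_degree (objective: alternative decomposition).

-- ===== PORT A =====
-- G[node]: first-match association-list lookup; exact here because every looked-up
-- node comes from G's key list, so the key is always present (no KeyError reachable).
def pvLookup (G : List (Int × List Int)) (node : Int) : List Int :=
  ((G.find? (fun p => p.1 == node)).map (·.2)).getD []

def label_graph_minimize_outdegree (G : List (Int × List Int)) : List (Int × Int) :=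
  let sortedNodes := PySem.List.sorted (G.map (·.1)) (fun node => PySem.List.len (pvLookup G node))
  let final := sortedNodes.foldl
    (fun (acc : PySem.Dict Int Int × Int) node => (acc.1.insert node acc.2, acc.2 + 1))
    (PySem.Dict.empty, 1)
  final.1.items

-- ===== PORT B =====
def label_graph_minimize_outdegree_alt (G : List (Int × List Int)) : List (Int × Int) :=
  let degs : List (Int × Int) := G.map (fun p => (p.1, PySem.List.len p.2))
  let maxd : Int := PySem.List.maxD (degs.map (·.2)) (fun x => x) (-1)
  let order : List Int :=
    (PySem.List.pyRange 0 (maxd + 1) 1).flatMap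
      (fun d => (degs.filter (fun p => p.2 == d)).map (·.1))
  ((PySem.List.enumerate order 1).foldl
      (fun (acc : PySem.Dict Int Int) p => acc.insert p.2 p.1) PySem.Dict.empty).items

-- ===== PRECONDITION & SPEC =====
-- Pre_ excludes association lists with duplicate keys: a Python dict cannot contain
-- a duplicate key, so such lists do not represent an input of A.
def Pre_label_graph_minimize_outdegree (G : List (Int × List Int)) : Prop :=
  (G.map (·.1)).Nodup
instance (G : List (Int × List Int)) : Decidable (Pre_label_graph_minimize_outdegree G) := by
  unfold Pre_label_graph_minimize_outdegree; infer_instance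

def pvWitness_label_graph_minimize_outdegree : (List (Int × List Int)) := [(1, [2]), (2, [])]

def Spec_label_graph_minimize_outdegree (G : List (Int × List Int)) (out : List (Int × Int)) : Prop := out = label_graph_minimize_outdegree_alt G
instance (G : List (Int × List Int)) (out : List (Int × Int)) : Decidable (Spec_label_graph_minimize_outdegree G out) := by unfold Spec_label_graph_minimize_outdegree; infer_instance

-- ===== CLAIM (what is proved, stated in full; the proofs are below) =====
def Claim_equal_label_graph_minimize_outdegree : Prop := ∀ (G : List (Int × List Int)), Dom_label_graph_minimize_outdegree G → Pre_label_graph_minimize_outdegree G → Spec_label_graph_minimize_outdegree G (label_graph_minimize_outdegree G)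

-- ===== LEMMAS AND PROOFS =====

-- The emission order per ascending degree value, as one list (proof device).
def pvBuckets {α : Type} (key : α → Int) (M : Int) (l : List α) : List α :=
  (PySem.List.pyRange 0 (M + 1) 1).flatMap (fun d => l.filter (fun a => key a == d))

-- B's enumerate-fold and A's counter-fold build the same dict.
theorem pv_fold_eq (ns : List Int) (d : PySem.Dict Int Int) (label : Int) :
    (PySem.List.enumerate ns label).foldl (fun acc p => acc.insert p.2 p.1) d
      = (ns.foldl (fun acc n => (acc.1.insert n acc.2, acc.2 + 1)) (d, label)).1 := by
  induction ns generalizing d label with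
  | nil => rfl
  | cons n ns ih => simp [PySem.List.enumerate_cons, ih]
theorem pv_insertBy_split {α : Type} (p : α → α → Bool) (x : α) (A B : List α)
    (hA : ∀ a ∈ A, p x a = false) (hB : ∀ b ∈ B, p x b = true) :
    PySem.List.insertBy p x (A ++ B) = A ++ x :: B := by
  induction A with
  | nil =>
    cases B with
    | nil => rfl
    | cons b bs => simp [PySem.List.insertBy, hB b (by simp)]
  | cons a as ih =>
    have hrec := ih (fun y hy => hA y (List.mem_cons_of_mem _ hy))
    cases as <;> cases B <;>
      simp_all [PySem.List.insertBy, hA a (List.mem_cons_self ..)]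

theorem pv_buckets_snoc {α : Type} (key : α → Int) (M : Int) (l : List α) (x : α)
    (hx : 0 ≤ key x ∧ key x ≤ M) :
    PySem.List.insertBy (fun a b => decide (key a < key b)) x (pvBuckets key M l)
      = pvBuckets key M (l ++ [x]) := by
  set f := fun d => l.filter (fun a => key a == d) with hf
  set f' := fun d => (l ++ [x]).filter (fun a => key a == d) with hf'
  have hsplit : PySem.List.pyRange 0 (M + 1) 1
      = PySem.List.pyRange 0 (key x + 1) 1 ++ PySem.List.pyRange (key x + 1) (M + 1) 1 :=
    PySem.List.pyRange_one_append 0 (key x + 1) (M + 1) (by omega) (by omega)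
  have hmemA : ∀ a ∈ (PySem.List.pyRange 0 (key x + 1) 1).flatMap f,
      (decide (key x < key a)) = false := by
    intro a ha
    rcases List.mem_flatMap.1 ha with ⟨d, hd, haf⟩
    have hdr := (PySem.List.mem_pyRange_one).1 hd
    have : (key a == d) = true := (List.mem_filter.1 haf).2
    have : key a = d := by simpa using this
    simp; omega
  have hmemB : ∀ b ∈ (PySem.List.pyRange (key x + 1) (M + 1) 1).flatMap f,
      (decide (key x < key b)) = true := by
    intro b hb
    rcases List.mem_flatMap.1 hb with ⟨d, hd, hbf⟩
    have hdr := (PySem.List.mem_pyRange_one).1 hd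
    have : (key b == d) = true := (List.mem_filter.1 hbf).2
    have : key b = d := by simpa using this
    simp; omega
  have hL : PySem.List.insertBy (fun a b => decide (key a < key b)) x (pvBuckets key M l)
      = (PySem.List.pyRange 0 (key x + 1) 1).flatMap f
        ++ x :: (PySem.List.pyRange (key x + 1) (M + 1) 1).flatMap f := by
    rw [pvBuckets, ← hf, hsplit, List.flatMap_append]
    exact pv_insertBy_split _ x _ _ hmemA hmemB
  have hBeq : (PySem.List.pyRange (key x + 1) (M + 1) 1).flatMap f'
      = (PySem.List.pyRange (key x + 1) (M + 1) 1).flatMap f := by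
    apply List.flatMap_congr
    intro d hd
    have hdr := (PySem.List.mem_pyRange_one).1 hd
    rw [hf', hf]
    simp only [List.filter_append]
    have : (key x == d) = false := by simp; omega
    simp [List.filter, this]
  have hsplit2 : PySem.List.pyRange 0 (key x + 1) 1
      = PySem.List.pyRange 0 (key x) 1 ++ [key x] :=
    PySem.List.pyRange_one_succ_right hx.1
  have hAeq : (PySem.List.pyRange 0 (key x + 1) 1).flatMap f'
      = (PySem.List.pyRange 0 (key x + 1) 1).flatMap f ++ [x] := by
    rw [hsplit2, List.flatMap_append, List.flatMap_append]
    have h1 : (PySem.List.pyRange 0 (key x) 1).flatMap f'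
        = (PySem.List.pyRange 0 (key x) 1).flatMap f := by
      apply List.flatMap_congr
      intro d hd
      have hdr := (PySem.List.mem_pyRange_one).1 hd
      rw [hf', hf]
      simp only [List.filter_append]
      have : (key x == d) = false := by simp; omega
      simp [List.filter, this]
    have h2 : List.flatMap f' [key x] = List.flatMap f [key x] ++ [x] := by
      rw [hf', hf]
      simp [List.filter_append, List.filter]
    rw [h1, h2, List.append_assoc]
  calc PySem.List.insertBy (fun a b => decide (key a < key b)) x (pvBuckets key M l)
      = (PySem.List.pyRange 0 (key x + 1) 1).flatMap f
        ++ x :: (PySem.List.pyRange (key x + 1) (M + 1) 1).flatMap f := hL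
    _ = pvBuckets key M (l ++ [x]) := by
        rw [pvBuckets, ← hf', hsplit, List.flatMap_append, hBeq, hAeq]
        simp

theorem pv_sorted_eq_buckets {α : Type} (key : α → Int) (M : Int) (l : List α)
    (hl : ∀ a ∈ l, 0 ≤ key a ∧ key a ≤ M) :
    PySem.List.sorted l key false = pvBuckets key M l := by
  rw [PySem.List.sorted_eq_foldl_insertBy]
  induction l using List.reverseRecOn with
  | nil => simp [pvBuckets]
  | append_singleton l x ih =>
    rw [List.foldl_append, List.foldl_cons, List.foldl_nil,
      ih (fun a ha => hl a (by simp [ha]))]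
    exact pv_buckets_snoc key M l x (hl x (by simp))

theorem pv_find_self (G : List (Int × List Int)) (h : (G.map (·.1)).Nodup) :
    ∀ p ∈ G, G.find? (fun q => q.1 == p.1) = some p := by
  induction G with
  | nil => simp
  | cons g gs ih =>
    simp only [List.map_cons, List.nodup_cons] at h
    intro p hp
    rcases List.mem_cons.1 hp with rfl | hp'
    · simp [List.find?]
    · have hne : (g.1 == p.1) = false := by
        simp only [beq_eq_false_iff_ne, ne_eq]
        intro he
        exact h.1 (by rw [he]; exact List.mem_map_of_mem hp')
      simp [List.find?, hne, ih h.2 p hp']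

theorem pv_main (G : List (Int × List Int)) (hpre : (G.map (·.1)).Nodup) :
    label_graph_minimize_outdegree G = label_graph_minimize_outdegree_alt G := by
  simp only [label_graph_minimize_outdegree, label_graph_minimize_outdegree_alt]
  have hfind := pv_find_self G hpre
  have hkey : ∀ p ∈ G, PySem.List.len (pvLookup G p.1) = PySem.List.len p.2 := by
    intro p hp
    rw [pvLookup, hfind p hp]
    rfl
  set keyA := fun n => PySem.List.len (pvLookup G n) with hkeyA
  set degs : List (Int × Int) := G.map (fun p => (p.1, PySem.List.len p.2)) with hdegs
  set maxd : Int := PySem.List.maxD (degs.map (·.2)) (fun x => x) (-1) with hmaxd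
  have hb : ∀ n ∈ G.map (·.1), 0 ≤ keyA n ∧ keyA n ≤ maxd := by
    intro n hn
    rcases List.mem_map.1 hn with ⟨p, hp, rfl⟩
    have h1 : keyA p.1 = PySem.List.len p.2 := hkey p hp
    have h2 : PySem.List.len p.2 ∈ degs.map (·.2) := by
      rw [hdegs]
      exact List.mem_map.2 ⟨(p.1, PySem.List.len p.2),
        List.mem_map.2 ⟨p, hp, rfl⟩, rfl⟩
    refine ⟨?_, ?_⟩
    · rw [h1]; simp [PySem.List.len]
    · rw [h1, hmaxd]; exact PySem.List.le_maxD_id _ _ _ h2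
  rw [pv_sorted_eq_buckets keyA maxd _ hb]
  have horder : pvBuckets keyA maxd (G.map (·.1))
      = (PySem.List.pyRange 0 (maxd + 1) 1).flatMap
          (fun d => (degs.filter (fun p => p.2 == d)).map (·.1)) := by
    rw [pvBuckets]
    apply List.flatMap_congr
    intro d _
    rw [hdegs, List.filter_map, List.filter_map]
    rw [List.filter_congr (l := G) (p := (fun a => keyA a == d) ∘ fun (p : Int × List Int) => p.1)
      (q := (fun p => p.2 == d) ∘ fun (p : Int × List Int) => (p.1, PySem.List.len p.2))
      (fun p hp => by simp only [Function.comp, hkeyA]; rw [hkey p hp])]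
    rw [List.map_map]; rfl
  rw [horder, pv_fold_eq]

-- ===== VERDICT (by name: the statement is the Claim_ definition above) =====
theorem label_graph_minimize_outdegree_spec : Claim_equal_label_graph_minimize_outdegree := by
  intro G _hd hpre
  exact pv_main G hpre
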